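-- pv_equiv track=rewrite | github.com/DBAIWangGroup/revs | revs/path.py | _build_query_body
-- ===== SOURCE A (Python) =====
-- def _build_query_body(flag, path_length):
--     body_fragments = []
--     entities = []
--     current_entity = None
--     for i in range(1, path_length + 1):
--         if (flag & 1) == 1:
--             if i == 1:
--                 body_fragments.append('f1.subject=%s ')  # string injection is delayed
--                 entities.append('f1.subject')
--                 current_entity = 'f1.object'
--             else:
--                 body_fragments.append(' AND %s=f%d.subject ' % (current_entity, i))
--                 entities.append(current_entity)
--                 current_entity = 'f%d.object' % i
--         else:
--             if i == 1:
--                 body_fragments.append('f1.object=%s ')  # string injection is delayed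
--                 entities.append('f1.object')
--                 current_entity = 'f1.subject'
--             else:
--                 body_fragments.append(' AND %s=f%d.object ' % (current_entity, i))
--                 entities.append(current_entity)
--                 current_entity = 'f%d.subject' % i
--         if i == path_length:
--             body_fragments.append(' AND %s=%%s ' % current_entity)
--             entities.append(current_entity)
--         flag >>= 1
--     for i in range(path_length):
--         for j in range(i + 2, path_length + 1):  # assume subject != object in the same triple
--             if i == 0 and j == path_length:  # ignore source != target restriction
--                 continue
--             body_fragments.append(' AND %s<>%s ' % (entities[i], entities[j]))
--     return ''.join(body_fragments)
-- ===== SOURCE B (Python) =====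
-- def _build_query_body(flag, path_length):
--     if path_length <= 0:
--         return ''
--     bits = [(flag >> (i - 1)) & 1 for i in range(1, path_length + 1)]
--     nodes = ['f1.subject' if bits[0] else 'f1.object']
--     for i in range(1, path_length + 1):
--         nodes.append('f%d.%s' % (i, 'object' if bits[i - 1] else 'subject'))
--     parts = [nodes[0] + '=%s ']
--     for i in range(2, path_length + 1):
--         parts.append(' AND %s=f%d.%s ' % (nodes[i - 1], i, 'subject' if bits[i - 1] else 'object'))
--     parts.append(' AND %s=%%s ' % nodes[path_length])
--     ineqs = [' AND %s<>%s ' % (nodes[i], nodes[j])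
--              for i in range(path_length)
--              for j in range(i + 2, path_length + 1)
--              if not (i == 0 and j == path_length)]
--     return ''.join(parts + ineqs)
-- ===== Notes on version B (the rewrite author's own statement) =====
-- stated objective: alternative
-- what changed: B replaces A's single stateful loop (which threads current_entity and destructively shifts flag) by three independent passes: decode the flag bits up front with (flag >> (i-1)) & 1, build the chained node-name list once, then emit the join equalities and the inequality fragments from that list by pure indexing.
import Mathlib
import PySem

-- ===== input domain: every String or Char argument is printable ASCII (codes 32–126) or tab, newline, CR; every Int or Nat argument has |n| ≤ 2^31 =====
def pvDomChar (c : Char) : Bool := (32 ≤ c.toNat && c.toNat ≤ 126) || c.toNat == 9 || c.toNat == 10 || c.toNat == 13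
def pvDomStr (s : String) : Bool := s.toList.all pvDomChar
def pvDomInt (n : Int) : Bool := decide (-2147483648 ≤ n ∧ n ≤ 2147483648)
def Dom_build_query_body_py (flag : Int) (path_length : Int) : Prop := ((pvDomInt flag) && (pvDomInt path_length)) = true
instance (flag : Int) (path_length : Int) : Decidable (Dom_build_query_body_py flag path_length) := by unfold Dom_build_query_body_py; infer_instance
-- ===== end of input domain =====

-- B re-implements A by a different decomposition: decode the flag's bits up front, build the chain-node
-- name list once, then emit the equalities and inequalities from that list (objective: simpler; same cost).

-- ===== PORT A =====
-- Python's arithmetic right shift a >> k (k ≥ 0), with the shift width pinned to Nat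
def pyShr (a : Int) (k : Nat) : Int := a >>> k

-- one iteration of A's first loop; state = (body_fragments, entities, current_entity, flag)
def aStep (L : Int) (st : List String × List String × Option String × Int) (i : Int) :
    List String × List String × Option String × Int :=
  let frags := st.1
  let ents := st.2.1
  let cur := st.2.2.1
  let fl := st.2.2.2
  let s1 :=
    if PySem.Int.band fl 1 == 1 then
      if i == 1 then
        (frags ++ ["f1.subject=%s "], ents ++ ["f1.subject"], some "f1.object")
      else
        -- current_entity is always set here; Python would print 'None' otherwise
        let c := cur.getD "None"
        (frags ++ [" AND " ++ c ++ "=f" ++ PySem.Int.toStr i ++ ".subject "], ents ++ [c],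
         some ("f" ++ PySem.Int.toStr i ++ ".object"))
    else
      if i == 1 then
        (frags ++ ["f1.object=%s "], ents ++ ["f1.object"], some "f1.subject")
      else
        let c := cur.getD "None"
        (frags ++ [" AND " ++ c ++ "=f" ++ PySem.Int.toStr i ++ ".object "], ents ++ [c],
         some ("f" ++ PySem.Int.toStr i ++ ".subject"))
  let s2 :=
    if i == L then
      (s1.1 ++ [" AND " ++ s1.2.2.getD "None" ++ "=%s "], s1.2.1 ++ [s1.2.2.getD "None"], s1.2.2)
    else s1
  (s2.1, s2.2.1, s2.2.2, pyShr fl 1)   -- flag >>= 1 (Python's arithmetic shift)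

def build_query_body_py (flag : Int) (path_length : Int) : String :=
  let st := (PySem.List.pyRange 1 (path_length + 1) 1).foldl (aStep path_length) ([], [], none, flag)
  let ents := st.2.1
  -- second loop: inequality fragments; entities[i]/entities[j] are always in range here
  let frags := (PySem.List.pyRange 0 path_length 1).foldl (fun acc i =>
      (PySem.List.pyRange (i + 2) (path_length + 1) 1).foldl (fun acc j =>
        if i == 0 && j == path_length then acc
        else acc ++ [" AND " ++ PySem.List.pyGetD ents i "" ++ "<>" ++ PySem.List.pyGetD ents j "" ++ " "]) acc) st.1
  PySem.Str.join "" frags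

-- ===== PORT B =====
def build_query_body_py_alt (flag : Int) (path_length : Int) : String :=
  if path_length ≤ 0 then "" else
  -- bits[i-1] = truth of bit i of flag; i ≥ 1 throughout, so (i-1).toNat is Python's i-1
  let bits := (PySem.List.pyRange 1 (path_length + 1) 1).map
      (fun i => PySem.Int.band (pyShr flag ((i - (1 : Int)).toNat)) 1 == 1)
  let nodes := [if PySem.List.pyGetD bits 0 false then "f1.subject" else "f1.object"]
  let nodes := (PySem.List.pyRange 1 (path_length + 1) 1).foldl (fun ns i =>
      ns ++ ["f" ++ PySem.Int.toStr i ++ (if PySem.List.pyGetD bits (i - 1) false then ".object" else ".subject")]) nodes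
  let parts := [PySem.List.pyGetD nodes 0 "" ++ "=%s "]
  let parts := (PySem.List.pyRange 2 (path_length + 1) 1).foldl (fun ps i =>
      ps ++ [" AND " ++ PySem.List.pyGetD nodes (i - 1) "" ++ "=f" ++ PySem.Int.toStr i ++
             (if PySem.List.pyGetD bits (i - 1) false then ".subject " else ".object ")]) parts
  let parts := parts ++ [" AND " ++ PySem.List.pyGetD nodes path_length "" ++ "=%s "]
  let ineqs := (PySem.List.pyRange 0 path_length 1).flatMap (fun i =>
      (PySem.List.pyRange (i + 2) (path_length + 1) 1).filterMap (fun j =>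
        if i == 0 && j == path_length then none
        else some (" AND " ++ PySem.List.pyGetD nodes i "" ++ "<>" ++ PySem.List.pyGetD nodes j "" ++ " ")))
  PySem.Str.join "" (parts ++ ineqs)

-- ===== PRECONDITION & SPEC =====
def Spec_build_query_body_py (flag : Int) (path_length : Int) (out : String) : Prop := out = build_query_body_py_alt flag path_length
instance (flag : Int) (path_length : Int) (out : String) : Decidable (Spec_build_query_body_py flag path_length out) := by unfold Spec_build_query_body_py; infer_instance

-- ===== CLAIM (what is proved, stated in full; the proofs are below) =====
def Claim_equal_build_query_body_py : Prop := ∀ (flag : Int) (path_length : Int), Dom_build_query_body_py flag path_length → Spec_build_query_body_py flag path_length (build_query_body_py flag path_length)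

-- ===== LEMMAS AND PROOFS =====

-- bit i of flag (i ≥ 1), as tested by both programs
def bitB (flag : Int) (i : Nat) : Bool := PySem.Int.band (pyShr flag (i - 1)) 1 == 1

-- the chain of node names: node 0 is the start, node k (k ≥ 1) the far end of triple k
def nodeF (flag : Int) : Nat → String
  | 0 => if bitB flag 1 then "f1.subject" else "f1.object"
  | (k+1) => "f" ++ PySem.Int.toStr ((k : Int) + 1) ++ (if bitB flag (k+1) then ".object" else ".subject")

-- the join-equality fragment emitted at step i = k+1 (k ≥ 1)
def eqFragF (flag : Int) (k : Nat) : String :=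
  " AND " ++ nodeF flag k ++ "=f" ++ PySem.Int.toStr ((k : Int) + 1) ++
    (if bitB flag (k+1) then ".subject " else ".object ")

def NL (flag : Int) (m : Nat) : List String := (List.range m).map (nodeF flag)
def PL (flag : Int) (m : Nat) : List String :=
  (nodeF flag 0 ++ "=%s ") :: (List.range (m - 1)).map (fun j => eqFragF flag (j + 1))

lemma NL_succ (flag : Int) (m : Nat) : NL flag (m+1) = NL flag m ++ [nodeF flag m] := by
  simp [NL, List.range_succ]

lemma PL_succ (flag : Int) (m : Nat) (hm : 1 ≤ m) :
    PL flag (m+1) = PL flag m ++ [eqFragF flag m] := by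
  obtain ⟨k, rfl⟩ := Nat.exists_eq_add_of_le hm
  simp [PL, show 1 + k = k + 1 from by omega, List.range_succ]

-- invariant of A's first loop
lemma loopA_inv (flag L : Int) (m : Nat) (hm : 1 ≤ m) (hmL : (m : Int) ≤ L) :
    (PySem.List.pyRange 1 ((m : Int) + 1) 1).foldl (aStep L) ([], [], none, flag) =
      (PL flag m ++ (if (m : Int) = L then [" AND " ++ nodeF flag m ++ "=%s "] else []),
       NL flag m ++ (if (m : Int) = L then [nodeF flag m] else []),
       some (nodeF flag m),
       flag >>> m) := by
  revert hmL
  induction m, hm using Nat.le_induction with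
  | base =>
    intro hmL
    rw [show (((1:Nat) : Int) + 1) = 1 + 1 by norm_num]
    rw [PySem.List.pyRange_one_cons (by omega), PySem.List.pyRange_one_eq_nil (by omega)]
    by_cases h1L : (1 : Int) = L
    · subst h1L
      by_cases hb : PySem.Int.band flag 1 = 1 <;>
        simp [aStep, PL, NL, nodeF, bitB, pyShr, Int.shiftRight_zero, hb] <;> try decide
    · by_cases hb : PySem.Int.band flag 1 = 1 <;>
        simp [aStep, h1L, PL, NL, nodeF, bitB, pyShr, Int.shiftRight_zero, hb] <;> try decide
  | succ m hm ih =>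
    intro hmL
    have hmL' : (m : Int) ≤ L := by push_cast at hmL ⊢; omega
    have hmne : ¬ ((m : Int) = L) := by push_cast at hmL; omega
    rw [show (((m + 1 : Nat) : Int) + 1) = ((m : Int) + 1) + 1 by push_cast; ring]
    rw [PySem.List.pyRange_one_succ_right (by omega), List.foldl_append,
        ih hmL']
    simp only [hmne, if_false, List.foldl_cons, List.foldl_nil, List.append_nil]
    have hne1 : (((m : Int) + 1) == 1) = false := by simp; omega
    by_cases hif : ((m : Int) + 1 = L)
    · subst hif
      by_cases hb : PySem.Int.band (flag >>> m) 1 = 1 <;>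
        simp [aStep, hne1, bitB, pyShr, hb, Int.shiftRight_add, PL_succ flag m hm,
              NL_succ, eqFragF, nodeF, Nat.cast_add, Nat.cast_one]
    · by_cases hb : PySem.Int.band (flag >>> m) 1 = 1 <;>
        simp [aStep, hne1, hif, bitB, pyShr, hb, Int.shiftRight_add, PL_succ flag m hm,
              NL_succ, eqFragF, nodeF, Nat.cast_add, Nat.cast_one]

-- indexing the decoded bit list
lemma bits_get (flag : Int) (n : Nat) (k : Nat) (hk : k < n) :
    PySem.List.pyGetD ((PySem.List.pyRange 1 ((n : Int) + 1) 1).map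
      (fun i => PySem.Int.band (pyShr flag ((i - (1 : Int)).toNat)) 1 == 1)) ((k : Int)) false =
      bitB flag (k + 1) := by
  rw [PySem.List.pyGetD_map_pyRange_one _ 1 ((n : Int) + 1) k false (by omega)]
  rw [show ((1 : Int) + (k : Int) - 1).toNat = k by omega]
  rfl

-- indexing a mapped range at a Nat-cast index
lemma rangeMap_get (f : Nat → String) (N k : Nat) (hk : k < N) (d : String) :
    PySem.List.pyGetD ((List.range N).map f) ((k : Int)) d = f k := by
  rw [PySem.List.pyGetD_natCast]
  simp [List.getD, hk]

-- B's nodes loop builds the node list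
lemma nodesB_aux (flag : Int) (n : Nat) (hn1 : 1 ≤ n) (m : Nat) (hmn : m ≤ n) :
    (PySem.List.pyRange 1 ((m : Int) + 1) 1).foldl (fun ns i =>
        ns ++ ["f" ++ PySem.Int.toStr i ++
          (if PySem.List.pyGetD ((PySem.List.pyRange 1 ((n : Int) + 1) 1).map
              (fun i => PySem.Int.band (pyShr flag ((i - (1 : Int)).toNat)) 1 == 1)) (i - 1) false
           then ".object" else ".subject")])
      [if PySem.List.pyGetD ((PySem.List.pyRange 1 ((n : Int) + 1) 1).map
          (fun i => PySem.Int.band (pyShr flag ((i - (1 : Int)).toNat)) 1 == 1)) 0 false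
        then "f1.subject" else "f1.object"] =
      (List.range (m + 1)).map (nodeF flag) := by
  induction m with
  | zero =>
    rw [show PySem.List.pyRange 1 (((0 : Nat) : Int) + 1) 1 = [] from
          PySem.List.pyRange_one_eq_nil (by norm_num)]
    have h0 := bits_get flag n 0 (by omega)
    simp only [Nat.cast_zero] at h0
    rw [List.foldl_nil, h0]
    simp [nodeF]
  | succ m ih =>
    have hmn' : m ≤ n := by omega
    rw [show (((m + 1 : Nat) : Int) + 1) = ((m : Int) + 1) + 1 by push_cast; ring]
    rw [show PySem.List.pyRange 1 (((m : Int) + 1) + 1) 1 =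
          PySem.List.pyRange 1 ((m : Int) + 1) 1 ++ [(m : Int) + 1] from
          PySem.List.pyRange_one_succ_right (by omega), List.foldl_append, ih hmn']
    have hidx : ((m : Int) + 1 - 1) = ((m : Nat) : Int) := by ring
    simp only [List.foldl_cons, List.foldl_nil, hidx, bits_get flag n m (by omega)]
    by_cases hb : bitB flag (m + 1) <;>
      simp [hb, nodeF, List.range_succ]

-- B's parts loop builds the equality fragments
lemma partsB_aux (flag : Int) (n : Nat) (m : Nat) (hm : 1 ≤ m) (hmn : m ≤ n) :
    (PySem.List.pyRange 2 ((m : Int) + 1) 1).foldl (fun ps i =>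
        ps ++ [" AND " ++ PySem.List.pyGetD ((List.range (n + 1)).map (nodeF flag)) (i - 1) "" ++
          "=f" ++ PySem.Int.toStr i ++
          (if PySem.List.pyGetD ((PySem.List.pyRange 1 ((n : Int) + 1) 1).map
              (fun i => PySem.Int.band (pyShr flag ((i - (1 : Int)).toNat)) 1 == 1)) (i - 1) false
           then ".subject " else ".object ")])
      [PySem.List.pyGetD ((List.range (n + 1)).map (nodeF flag)) 0 "" ++ "=%s "] =
      PL flag m := by
  revert hmn
  induction m, hm using Nat.le_induction with
  | base =>
    intro hmn
    rw [show (((1 : Nat) : Int) + 1) = 2 by norm_num]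
    rw [show PySem.List.pyRange 2 2 1 = [] from PySem.List.pyRange_one_eq_nil (by norm_num)]
    have h0 := rangeMap_get (nodeF flag) (n + 1) 0 (by omega) ""
    simp only [Nat.cast_zero] at h0
    rw [List.foldl_nil, h0]
    simp [PL]
  | succ m hm ih =>
    intro hmn
    rw [show (((m + 1 : Nat) : Int) + 1) = ((m : Int) + 1) + 1 by push_cast; ring]
    rw [show PySem.List.pyRange 2 (((m : Int) + 1) + 1) 1 =
          PySem.List.pyRange 2 ((m : Int) + 1) 1 ++ [(m : Int) + 1] from
          PySem.List.pyRange_one_succ_right (by omega), List.foldl_append, ih (by omega)]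
    have hidx : ((m : Int) + 1 - 1) = ((m : Nat) : Int) := by ring
    simp only [List.foldl_cons, List.foldl_nil, hidx, bits_get flag n m (by omega),
               rangeMap_get (nodeF flag) (n + 1) m (by omega) ""]
    rw [PL_succ flag m hm]
    simp [eqFragF]

-- a conditional-append inner loop is a filterMap
lemma foldl_if_append {α β : Type} (l : List α) (p : α → Bool) (g : α → β) (init : List β) :
    l.foldl (fun acc j => if p j then acc else acc ++ [g j]) init =
      init ++ l.filterMap (fun j => if p j then none else some (g j)) := by
  induction l generalizing init with
  | nil => simp
  | cons x xs ih => by_cases h : p x <;> simp [h, ih]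

-- the whole computation, for a positive path length given as a Nat
lemma core_eq (flag : Int) (n : Nat) (h1 : 1 ≤ n) :
    build_query_body_py flag ((n : Int)) = build_query_body_py_alt flag ((n : Int)) := by
  simp only [build_query_body_py, build_query_body_py_alt]
  rw [if_neg (by omega : ¬ ((n : Int) ≤ 0))]
  rw [loopA_inv flag ((n : Int)) n h1 (le_refl _), if_pos rfl]
  simp only []
  rw [nodesB_aux flag n h1 n (le_refl _), partsB_aux flag n n h1 (le_refl _)]
  simp only [if_true]
  have hents : NL flag n ++ [nodeF flag n] = (List.range (n + 1)).map (nodeF flag) := by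
    rw [← NL_succ]; rfl
  rw [hents]
  rw [rangeMap_get (nodeF flag) (n + 1) n (by omega) ""]
  have hinner : ∀ (i : Int) (acc : List String),
      (PySem.List.pyRange (i + 2) ((n : Int) + 1) 1).foldl (fun acc j =>
        if i == 0 && j == (n : Int) then acc
        else acc ++ [" AND " ++ PySem.List.pyGetD ((List.range (n + 1)).map (nodeF flag)) i "" ++
          "<>" ++ PySem.List.pyGetD ((List.range (n + 1)).map (nodeF flag)) j "" ++ " "]) acc =
      acc ++ (PySem.List.pyRange (i + 2) ((n : Int) + 1) 1).filterMap (fun j =>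
        if i == 0 && j == (n : Int) then none
        else some (" AND " ++ PySem.List.pyGetD ((List.range (n + 1)).map (nodeF flag)) i "" ++
          "<>" ++ PySem.List.pyGetD ((List.range (n + 1)).map (nodeF flag)) j "" ++ " ")) := by
    intro i acc
    exact foldl_if_append _ (fun j => i == 0 && j == (n : Int)) _ acc
  refine congrArg (PySem.Str.join "") ?_
  calc (PySem.List.pyRange 0 ((n : Int)) 1).foldl (fun acc i =>
          (PySem.List.pyRange (i + 2) ((n : Int) + 1) 1).foldl (fun acc j =>
            if i == 0 && j == (n : Int) then acc
            else acc ++ [" AND " ++ PySem.List.pyGetD ((List.range (n + 1)).map (nodeF flag)) i "" ++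
              "<>" ++ PySem.List.pyGetD ((List.range (n + 1)).map (nodeF flag)) j "" ++ " "]) acc)
          (PL flag n ++ [" AND " ++ nodeF flag n ++ "=%s "])
      = (PL flag n ++ [" AND " ++ nodeF flag n ++ "=%s "]) ++
          (PySem.List.pyRange 0 ((n : Int)) 1).flatMap (fun i =>
            (PySem.List.pyRange (i + 2) ((n : Int) + 1) 1).filterMap (fun j =>
              if i == 0 && j == (n : Int) then none
              else some (" AND " ++ PySem.List.pyGetD ((List.range (n + 1)).map (nodeF flag)) i "" ++
                "<>" ++ PySem.List.pyGetD ((List.range (n + 1)).map (nodeF flag)) j "" ++ " "))) := by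
        rw [← PySem.List.foldl_append_eq_flatMap]
        congr 1
        funext acc i
        exact hinner i acc
    _ = _ := rfl
  -- goal should be closed: both sides now the same join

-- ===== VERDICT (by name: the statement is the Claim_ definition above) =====
theorem build_query_body_py_spec : Claim_equal_build_query_body_py := by
  intro flag path_length _
  unfold Spec_build_query_body_py
  by_cases hL : path_length ≤ 0
  · unfold build_query_body_py build_query_body_py_alt
    rw [if_pos hL]
    rw [PySem.List.pyRange_one_eq_nil (by omega), PySem.List.pyRange_one_eq_nil (by omega)]
    rfl
  · have hn : ((path_length.toNat : Nat) : Int) = path_length := Int.toNat_of_nonneg (by omega)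
    rw [← hn]
    exact core_eq flag path_length.toNat (by omega)
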